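-- pv_equiv track=rewrite | github.com/muhammady9646/sentiment-analyser | app.py | _parse_selected_brand_indexes
-- ===== SOURCE A (Python) =====
-- def _parse_selected_brand_indexes(raw_values: list[str], total_brands: int) -> list[int]:
--     if total_brands <= 0:
--         return []
--     if not raw_values:
--         return list(range(total_brands))
--
--     selected: list[int] = []
--     seen: set[int] = set()
--     for raw in raw_values:
--         try:
--             index = int(str(raw).strip())
--         except ValueError:
--             continue
--         if index < 0 or index >= total_brands:
--             continue
--         if index in seen:
--             continue
--         seen.add(index)
--         selected.append(index)
--     return selected
-- ===== SOURCE B (Python) =====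
-- def _parse_selected_brand_indexes(raw_values: list[str], total_brands: int) -> list[int]:
--     if total_brands <= 0:
--         return []
--     if not raw_values:
--         return list(range(total_brands))
--
--     first_pos: dict[int, int] = {}
--     for pos, raw in enumerate(raw_values):
--         try:
--             index = int(str(raw).strip())
--         except ValueError:
--             continue
--         if 0 <= index < total_brands:
--             first_pos.setdefault(index, pos)
--     return [index for index, _ in sorted(first_pos.items(), key=lambda item: item[1])]
-- ===== Notes on version B (the rewrite author's own statement) =====
-- stated objective: alternative
-- what changed: Instead of appending to an output list guarded by a seen-set, B records the first position of each valid index in a dict and reconstructs the output by sorting the (index, first_position) pairs by position.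
import Mathlib
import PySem

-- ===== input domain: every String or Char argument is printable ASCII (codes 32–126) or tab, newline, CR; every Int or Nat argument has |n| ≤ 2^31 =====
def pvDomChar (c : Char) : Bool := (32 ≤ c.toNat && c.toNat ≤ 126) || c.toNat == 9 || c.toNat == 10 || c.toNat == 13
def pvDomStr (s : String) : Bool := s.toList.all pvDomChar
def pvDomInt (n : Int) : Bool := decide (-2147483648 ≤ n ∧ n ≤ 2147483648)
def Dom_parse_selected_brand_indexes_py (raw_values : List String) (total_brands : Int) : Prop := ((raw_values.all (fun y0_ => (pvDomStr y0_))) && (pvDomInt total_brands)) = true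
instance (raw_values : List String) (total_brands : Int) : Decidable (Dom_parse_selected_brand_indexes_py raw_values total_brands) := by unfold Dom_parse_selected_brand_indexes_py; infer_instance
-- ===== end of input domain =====

-- B replaces A's append-with-seen-set loop by a first-position map: it records the first
-- position of every valid index in a dict, then sorts the (index, position) pairs by position.

-- ===== PORT A =====
-- loop body of A: try int(str(raw).strip()) / range check / seen-set check / append
def pvStepA (total_brands : Int) (st : List Int × PySem.Set Int) (raw : String) : List Int × PySem.Set Int :=
  match PySem.Int.ofStr? (PySem.Str.strip raw) with
  | none => st
  | some index =>
    if index < 0 ∨ index ≥ total_brands then st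
    else if index ∈ st.2 then st
    else (st.1 ++ [index], PySem.Set.add st.2 index)

def parse_selected_brand_indexes_py (raw_values : List String) (total_brands : Int) : List Int :=
  if total_brands ≤ 0 then []
  else if raw_values = [] then PySem.List.pyRange 0 total_brands 1
  else (raw_values.foldl (pvStepA total_brands) ([], PySem.Set.empty)).1

-- ===== PORT B =====
-- loop body of B: parse, range-check, first_pos.setdefault(index, pos)
def pvStepB (total_brands : Int) (d : PySem.Dict Int Int) (pr : Int × String) : PySem.Dict Int Int :=
  match PySem.Int.ofStr? (PySem.Str.strip pr.2) with
  | none => d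
  | some index =>
    if 0 ≤ index ∧ index < total_brands then d.setdefault index pr.1 else d

def parse_selected_brand_indexes_py_alt (raw_values : List String) (total_brands : Int) : List Int :=
  if total_brands ≤ 0 then []
  else if raw_values = [] then PySem.List.pyRange 0 total_brands 1
  else
    let first_pos := (PySem.List.enumerate raw_values 0).foldl (pvStepB total_brands) PySem.Dict.empty
    (PySem.List.sorted first_pos.items (fun item => item.2) false).map (fun item => item.1)

-- ===== PRECONDITION & SPEC =====
def Spec_parse_selected_brand_indexes_py (raw_values : List String) (total_brands : Int) (out : List Int) : Prop := out = parse_selected_brand_indexes_py_alt raw_values total_brands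
instance (raw_values : List String) (total_brands : Int) (out : List Int) : Decidable (Spec_parse_selected_brand_indexes_py raw_values total_brands out) := by unfold Spec_parse_selected_brand_indexes_py; infer_instance

-- ===== CLAIM =====
def Claim_equal_parse_selected_brand_indexes_py : Prop := ∀ (raw_values : List String) (total_brands : Int), Dom_parse_selected_brand_indexes_py raw_values total_brands → Spec_parse_selected_brand_indexes_py raw_values total_brands (parse_selected_brand_indexes_py raw_values total_brands)

-- ===== LEMMAS AND PROOFS =====
-- Loop invariant relating A's (selected, seen) to B's first-position dict d while B walks the
-- enumerated list from position pos0: the keys of d (in insertion order) are exactly 'selected',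
-- and the stored positions are strictly increasing and all below pos0.
lemma pvInv (t : Int) : ∀ (xs : List String) (d : PySem.Dict Int Int) (s : List Int) (pos0 : Int),
    d.items.map Prod.fst = s →
    (d.items.map Prod.snd).Pairwise (· < ·) →
    (∀ v ∈ d.items.map Prod.snd, v < pos0) →
    ((PySem.List.enumerate xs pos0).foldl (pvStepB t) d).items.map Prod.fst
        = (xs.foldl (pvStepA t) (s, s)).1 ∧
    (((PySem.List.enumerate xs pos0).foldl (pvStepB t) d).items.map Prod.snd).Pairwise (· < ·) := by
  intro xs
  induction xs with
  | nil => intro d s pos0 hk hp _; simpa [PySem.List.enumerate_nil] using ⟨hk, hp⟩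
  | cons x xs ih =>
    intro d s pos0 hk hp hb
    rw [PySem.List.enumerate_cons]
    simp only [List.foldl_cons]
    cases h : PySem.Int.ofStr? (PySem.Str.strip x) with
    | none =>
      have hB : pvStepB t d (pos0, x) = d := by simp only [pvStepB, h]
      have hA : pvStepA t (s, s) x = (s, s) := by simp only [pvStepA, h]
      rw [hB, hA]
      exact ih d s (pos0 + 1) hk hp (fun v hv => by have := hb v hv; omega)
    | some index =>
      by_cases hr : 0 ≤ index ∧ index < t
      · have hr' : ¬ (index < 0 ∨ index ≥ t) := by omega
        have hB : pvStepB t d (pos0, x) = d.setdefault index pos0 := by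
          simp only [pvStepB, h, if_pos hr]
        by_cases hm : index ∈ s
        · -- already present: both sides leave their state unchanged
          have hc : d.contains index = true := by
            rw [PySem.Dict.contains_iff_mem_keys]
            simpa [PySem.Dict.keys, hk] using hm
          have hA : pvStepA t (s, s) x = (s, s) := by
            simp only [pvStepA, h, if_neg hr', if_pos hm]
          rw [hB, PySem.Dict.setdefault_of_contains d pos0 hc, hA]
          exact ih d s (pos0 + 1) hk hp (fun v hv => by have := hb v hv; omega)
        · -- fresh index: A appends, B inserts (index, pos0) at the end
          have hc : d.contains index = false := by
            rw [← Bool.not_eq_true, PySem.Dict.contains_iff_mem_keys]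
            simpa [PySem.Dict.keys, hk] using hm
          have hadd : PySem.Set.add s index = s ++ [index] := by
            simp [PySem.Set.add, PySem.Set.contains, hm]
          have hA : pvStepA t (s, s) x = (s ++ [index], s ++ [index]) := by
            simp only [pvStepA, h, if_neg hr', if_neg hm]
            exact Prod.ext rfl hadd
          have hitems : (d.setdefault index pos0).items = d.items ++ [(index, pos0)] := by
            rw [PySem.Dict.setdefault_of_not_contains d pos0 hc,
                PySem.Dict.items_insert_of_not_contains d pos0 hc]
          rw [hB, hA]
          refine ih (d.setdefault index pos0) (s ++ [index]) (pos0 + 1) ?_ ?_ ?_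
          · simp [hitems, hk]
          · simp only [hitems, List.map_append, List.map_cons, List.map_nil]
            rw [List.pairwise_append]
            exact ⟨hp, List.pairwise_singleton _ _, fun a ha b hb' => by
              simp at hb'; subst hb'; exact hb a ha⟩
          · intro v hv
            simp only [hitems, List.map_append, List.map_cons, List.map_nil,
              List.mem_append, List.mem_singleton] at hv
            rcases hv with hv | hv
            · have := hb v hv; omega
            · omega
      · have hr' : index < 0 ∨ index ≥ t := by omega
        have hB : pvStepB t d (pos0, x) = d := by simp only [pvStepB, h, if_neg hr]
        have hA : pvStepA t (s, s) x = (s, s) := by simp only [pvStepA, h, if_pos hr']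
        rw [hB, hA]
        exact ih d s (pos0 + 1) hk hp (fun v hv => by have := hb v hv; omega)

-- ===== VERDICT =====
theorem parse_selected_brand_indexes_py_spec : Claim_equal_parse_selected_brand_indexes_py := by
  intro raw_values total_brands _
  unfold Spec_parse_selected_brand_indexes_py
  unfold parse_selected_brand_indexes_py parse_selected_brand_indexes_py_alt
  by_cases h1 : total_brands ≤ 0
  · simp [h1]
  · by_cases h2 : raw_values = []
    · simp [h1, h2]
    · simp only [h1, h2, if_false]
      obtain ⟨hfst, hpair⟩ := pvInv total_brands raw_values PySem.Dict.empty [] 0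
        (by simp [PySem.Dict.empty]) (by simp [PySem.Dict.empty]) (by simp [PySem.Dict.empty])
      have hsorted : PySem.List.sorted
          ((PySem.List.enumerate raw_values 0).foldl (pvStepB total_brands) PySem.Dict.empty).items
          (fun item => item.2) false
          = ((PySem.List.enumerate raw_values 0).foldl (pvStepB total_brands) PySem.Dict.empty).items := by
        apply PySem.List.sorted_eq_self_of_pairwise
        have := (List.pairwise_map.mp hpair)
        exact this.imp (fun hab => le_of_lt hab)
      rw [hsorted]
      exact hfst.symm
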